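-- pv_equiv track=rewrite | github.com/teichmath/branch_and_bound | subgraph_ops.py | makeSortedTourVerticesFromSortedTourEdges
-- ===== SOURCE A (Python) =====
-- def makeSortedTourVerticesFromSortedTourEdges(tour_edges):
--     """
--     Input:
--         tour_edges (list): indices of edges, listed in order visited to perform a vertex tour.
--     Output:
--         tour (list): indices of graph vertices, listed in order visited to perform a vertex tour. Final value equals first value.
--         """
--     tour = [tour_edges[0][1][0], tour_edges[0][1][1]]
--     for i in range(len(tour_edges)):
--         for edge in tour_edges:
--             if tour[-1] in edge[1] and tour[-2] not in edge[1]: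
--                 tour += [item for item in edge[1] if item != tour[-1]]
--                 break
--     return tour
-- ===== SOURCE B (Python) =====
-- def makeSortedTourVerticesFromSortedTourEdges(tour_edges):
--     # Precompute vertex -> list of edge vertex-lists (original order), then walk the
--     # tour scanning only the current vertex's bucket instead of all edges each step.
--     adj = {}
--     for edge in tour_edges:
--         vs = edge[1]
--         for v in dict.fromkeys(vs):
--             adj.setdefault(v, []).append(vs)
--     tour = [tour_edges[0][1][0], tour_edges[0][1][1]]
--     for _ in range(len(tour_edges)):
--         last, prev = tour[-1], tour[-2]
--         for vs in adj.get(last, ()):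
--             if prev not in vs:
--                 tour += [v for v in vs if v != last]
--                 break
--     return tour
-- ===== Notes on version B (the rewrite author's own statement) =====
-- stated objective: alternative
-- what changed: B precomputes a vertex-to-edges adjacency dict once and, at each tour step, scans only the current end-vertex's bucket for the first edge not containing the previous vertex, instead of A's rescan of the whole edge list every step.
import Mathlib
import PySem

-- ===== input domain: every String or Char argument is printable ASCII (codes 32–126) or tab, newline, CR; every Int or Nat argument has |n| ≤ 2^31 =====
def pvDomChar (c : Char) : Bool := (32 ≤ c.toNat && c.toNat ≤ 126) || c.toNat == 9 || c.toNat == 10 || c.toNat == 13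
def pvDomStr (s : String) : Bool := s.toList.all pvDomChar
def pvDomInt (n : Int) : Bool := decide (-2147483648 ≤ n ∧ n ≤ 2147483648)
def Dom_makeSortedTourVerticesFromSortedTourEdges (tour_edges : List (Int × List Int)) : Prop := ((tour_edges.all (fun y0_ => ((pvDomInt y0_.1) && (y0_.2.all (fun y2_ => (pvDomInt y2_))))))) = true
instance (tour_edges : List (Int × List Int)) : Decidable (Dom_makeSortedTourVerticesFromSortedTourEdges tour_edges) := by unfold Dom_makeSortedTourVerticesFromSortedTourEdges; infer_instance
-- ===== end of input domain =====

-- B replaces A's per-step scan over ALL edges by a precomputed vertex→edges adjacency dict: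
-- each step scans only the current end-vertex's bucket (objective: alternative algorithm).

-- ===== PORT A =====
-- inner 'for edge in tour_edges: if cond: tour += …; break' = act on the first edge matching cond
def pvStepA (tour_edges : List (Int × List Int)) (tour : List Int) : List Int :=
  let last := PySem.List.pyGetD tour (-1) 0   -- tour[-1]; tour always has ≥ 2 elements here
  let prev := PySem.List.pyGetD tour (-2) 0   -- tour[-2]
  match tour_edges.find? (fun e => e.2.contains last && !(e.2.contains prev)) with
  | some e => tour ++ e.2.filter (fun item => item != last)
  | none => tour

def makeSortedTourVerticesFromSortedTourEdges (tour_edges : List (Int × List Int)) : List Int :=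
  match tour_edges with
  | [] => []          -- Python raises IndexError (tour_edges[0]); excluded by Pre_
  | e0 :: _ =>
    match e0.2 with
    | v0 :: v1 :: _ =>
      (List.range tour_edges.length).foldl (fun tour _ => pvStepA tour_edges tour) [v0, v1]
    | _ => []         -- Python raises IndexError (tour_edges[0][1][1]); excluded by Pre_

-- ===== PORT B =====
-- adj.setdefault(v, []).append(vs)  =  insert v (getD v [] ++ [vs]); dict.fromkeys = PySem.List.dedup
def pvAdjAdd (d : PySem.Dict Int (List (List Int))) (e : Int × List Int) :
    PySem.Dict Int (List (List Int)) :=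
  (PySem.List.dedup e.2).foldl (fun d v => d.insert v (d.getD v [] ++ [e.2])) d

def pvStepB (adj : PySem.Dict Int (List (List Int))) (tour : List Int) : List Int :=
  let last := PySem.List.pyGetD tour (-1) 0
  let prev := PySem.List.pyGetD tour (-2) 0
  match (adj.getD last []).find? (fun vs => !(vs.contains prev)) with
  | some vs => tour ++ vs.filter (fun v => v != last)
  | none => tour

def makeSortedTourVerticesFromSortedTourEdges_alt (tour_edges : List (Int × List Int)) : List Int :=
  let adj := tour_edges.foldl pvAdjAdd PySem.Dict.empty
  let first := (tour_edges.headD (0, [])).2   -- tour_edges[0][1] (Python raises on []; excluded by Pre_)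
  match PySem.List.pyGet? first 0, PySem.List.pyGet? first 1 with
  | some v0, some v1 =>
    (List.range tour_edges.length).foldl (fun tour _ => pvStepB adj tour) [v0, v1]
  | _, _ => []       -- Python B raises IndexError here (tour_edges[0][1][0/1]); excluded by Pre_

-- ===== PRECONDITION & SPEC =====
-- Pre_ excludes exactly the inputs where Python A raises IndexError: an empty edge list,
-- or a first edge whose vertex list has fewer than 2 entries.
def Pre_makeSortedTourVerticesFromSortedTourEdges (tour_edges : List (Int × List Int)) : Prop :=
  tour_edges ≠ [] ∧ 2 ≤ (tour_edges.headD (0, [])).2.length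
instance (tour_edges : List (Int × List Int)) : Decidable (Pre_makeSortedTourVerticesFromSortedTourEdges tour_edges) := by unfold Pre_makeSortedTourVerticesFromSortedTourEdges; infer_instance
def pvWitness_makeSortedTourVerticesFromSortedTourEdges : (List (Int × List Int)) :=
  [(0, [1, 2]), (1, [2, 3]), (2, [3, 1])]

def Spec_makeSortedTourVerticesFromSortedTourEdges (tour_edges : List (Int × List Int)) (out : List Int) : Prop := out = makeSortedTourVerticesFromSortedTourEdges_alt tour_edges
instance (tour_edges : List (Int × List Int)) (out : List Int) : Decidable (Spec_makeSortedTourVerticesFromSortedTourEdges tour_edges out) := by unfold Spec_makeSortedTourVerticesFromSortedTourEdges; infer_instance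

-- ===== CLAIM (what is proved, stated in full; the proofs are below) =====
def Claim_equal_makeSortedTourVerticesFromSortedTourEdges : Prop := ∀ (tour_edges : List (Int × List Int)), Dom_makeSortedTourVerticesFromSortedTourEdges tour_edges → Pre_makeSortedTourVerticesFromSortedTourEdges tour_edges → Spec_makeSortedTourVerticesFromSortedTourEdges tour_edges (makeSortedTourVerticesFromSortedTourEdges tour_edges)

-- ===== LEMMAS AND PROOFS =====

-- find? over a filtered list = find? with the conjoined predicate
theorem pvFind?_filter (l : List (Int × List Int)) (p q : (Int × List Int) → Bool) :
    (l.filter q).find? p = l.find? (fun a => q a && p a) := by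
  induction l with
  | nil => rfl
  | cons a l ih => by_cases h : q a <;> simp [List.find?, h, ih]

-- inserting x's edge under every key of a nodup key list, read back at k
theorem pvFoldInsert_getD (x : List Int) (vs : List Int) (hnd : vs.Nodup)
    (d : PySem.Dict Int (List (List Int))) (k : Int) :
    ((vs.foldl (fun d v => d.insert v (d.getD v [] ++ [x])) d).getD k []) =
      d.getD k [] ++ (if k ∈ vs then [x] else []) := by
  induction vs generalizing d with
  | nil => simp
  | cons v vs ih =>
    rcases List.nodup_cons.mp hnd with ⟨hv, hvs⟩
    simp only [List.foldl_cons]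
    rw [ih hvs]
    by_cases hk : k = v
    · subst hk
      rw [PySem.Dict.getD_insert_self]
      simp [hv]
    · rw [PySem.Dict.getD_insert_of_ne _ _ _ hk]
      simp [hk]

theorem pvAdjAdd_getD (d : PySem.Dict Int (List (List Int))) (e : Int × List Int) (k : Int) :
    (pvAdjAdd d e).getD k [] = d.getD k [] ++ (if k ∈ e.2 then [e.2] else []) := by
  unfold pvAdjAdd
  rw [pvFoldInsert_getD _ _ (PySem.List.nodup_dedup _)]
  simp

-- the bucket of k in the finished adjacency dict = the edges containing k, in order
theorem pvBuildAdj_getD (edges : List (Int × List Int)) (d : PySem.Dict Int (List (List Int)))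
    (k : Int) :
    ((edges.foldl pvAdjAdd d).getD k []) =
      d.getD k [] ++ (edges.filter (fun e => e.2.contains k)).map (·.2) := by
  induction edges generalizing d with
  | nil => simp
  | cons e es ih =>
    simp only [List.foldl_cons, ih, pvAdjAdd_getD]
    by_cases h : k ∈ e.2 <;> simp [h]

theorem pvGetD_empty (k : Int) :
    (PySem.Dict.empty : PySem.Dict Int (List (List Int))).getD k [] = [] := rfl

theorem pvStep_eq (edges : List (Int × List Int)) (tour : List Int) :
    pvStepB (edges.foldl pvAdjAdd PySem.Dict.empty) tour = pvStepA edges tour := by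
  unfold pvStepA pvStepB
  simp only [pvBuildAdj_getD, pvGetD_empty, List.nil_append, List.find?_map, pvFind?_filter,
    Function.comp]
  rcases h : edges.find? (fun e =>
      e.2.contains (PySem.List.pyGetD tour (-1) 0) &&
      !(e.2.contains (PySem.List.pyGetD tour (-2) 0))) with _ | e <;>
    rw [h] <;> rfl

-- ===== VERDICT (by name: the statement is the Claim_ definition above) =====
theorem makeSortedTourVerticesFromSortedTourEdges_spec : Claim_equal_makeSortedTourVerticesFromSortedTourEdges := by
  intro tour_edges _ _
  unfold Spec_makeSortedTourVerticesFromSortedTourEdges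
  cases tour_edges with
  | nil => rfl
  | cons e0 es =>
    obtain ⟨i0, l0⟩ := e0
    cases l0 with
    | nil => rfl
    | cons v0 rest =>
      cases rest with
      | nil => rfl
      | cons v1 vs' =>
        simp only [makeSortedTourVerticesFromSortedTourEdges,
          makeSortedTourVerticesFromSortedTourEdges_alt, List.headD_cons, pvStep_eq]
        simp [PySem.List.pyGet?, PySem.List.pyIdx?,
          show (0:Int) ≤ (vs'.length:Int) + 1 by positivity]
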